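-- pv_equiv track=rewrite | github.com/benquick123/code-profiling | code/batch-2/dn12 - krozisca/Z-17116-2373.py | sosedi
-- ===== SOURCE A (Python) =====
-- def sosedi(dolsej, zemljevid):
--     mnozica = set()
--     for deli in zemljevid:
--         if deli in dolsej:
--             for stevilke in zemljevid[deli]:
--                 if stevilke not in dolsej:
--                     mnozica.add(stevilke)
--     return mnozica
-- ===== SOURCE B (Python) =====
-- def sosedi(dolsej, zemljevid):
--     # divide and conquer: split the item list in halves, build a per-key local
--     # set of out-of-dolsej neighbors at each leaf, and combine halves by set union
--     items = list(zemljevid.items())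
--
--     def go(chunk):
--         if not chunk:
--             return set()
--         if len(chunk) == 1:
--             k, ns = chunk[0]
--             return {n for n in ns if n not in dolsej} if k in dolsej else set()
--         mid = len(chunk) // 2
--         return go(chunk[:mid]) | go(chunk[mid:])
--
--     return go(items)
-- ===== Notes on version B (the rewrite author's own statement) =====
-- stated objective: alternative
-- what changed: B is a divide-and-conquer recursion over the dict's item list: each leaf builds a small local set of the out-of-dolsej neighbors of one key, and halves are combined by set union, instead of A's single imperative nested loop mutating one accumulator set.
import Mathlib
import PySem

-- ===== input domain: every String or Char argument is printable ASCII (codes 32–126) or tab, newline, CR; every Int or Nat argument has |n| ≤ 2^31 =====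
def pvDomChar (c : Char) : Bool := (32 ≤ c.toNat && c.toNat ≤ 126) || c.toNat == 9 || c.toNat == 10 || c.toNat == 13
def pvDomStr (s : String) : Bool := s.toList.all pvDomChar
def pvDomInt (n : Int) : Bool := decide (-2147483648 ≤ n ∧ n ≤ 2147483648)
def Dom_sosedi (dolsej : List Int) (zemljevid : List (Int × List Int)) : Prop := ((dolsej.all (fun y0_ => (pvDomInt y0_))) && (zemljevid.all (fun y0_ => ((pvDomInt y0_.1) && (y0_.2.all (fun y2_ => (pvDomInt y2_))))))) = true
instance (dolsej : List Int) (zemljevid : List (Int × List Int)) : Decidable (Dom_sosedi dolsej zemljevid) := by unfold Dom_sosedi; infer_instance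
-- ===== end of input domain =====

-- B replaces A's single imperative nested loop over one accumulator set by a
-- divide-and-conquer recursion over the item list: per-key local sets at the
-- leaves, combined by set union (objective: alternative).

-- ===== PORT A =====
def sosedi (dolsej : List Int) (zemljevid : List (Int × List Int)) : List Int :=
  let zd := PySem.Dict.ofList zemljevid
  zd.keys.foldl
    (fun mnozica deli =>
      if dolsej.contains deli then
        (zd.getD deli []).foldl
          (fun m stevilke =>
            if !(dolsej.contains stevilke) then PySem.Set.add m stevilke else m)
          mnozica
      else mnozica)
    PySem.Set.empty

-- ===== PORT B =====
def sosediGo (dolsej : List Int) (chunk : List (Int × List Int)) : List Int :=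
  match chunk with
  | [] => PySem.Set.empty
  | [kn] =>
      if dolsej.contains kn.1 then
        PySem.Set.ofList (kn.2.filter (fun n => !(dolsej.contains n)))
      else PySem.Set.empty
  | a :: b :: rest =>
      let mid := (a :: b :: rest).length / 2
      PySem.Set.union (sosediGo dolsej ((a :: b :: rest).take mid))
                      (sosediGo dolsej ((a :: b :: rest).drop mid))
termination_by chunk.length
decreasing_by
  · simp [List.length_take]; omega
  · simp [List.length_drop]; omega

def sosedi_alt (dolsej : List Int) (zemljevid : List (Int × List Int)) : List Int :=
  let items := (PySem.Dict.ofList zemljevid).items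
  sosediGo dolsej items

-- ===== PRECONDITION & SPEC =====
def Spec_sosedi (dolsej : List Int) (zemljevid : List (Int × List Int)) (out : List Int) : Prop := out = sosedi_alt dolsej zemljevid
instance (dolsej : List Int) (zemljevid : List (Int × List Int)) (out : List Int) : Decidable (Spec_sosedi dolsej zemljevid out) := by unfold Spec_sosedi; infer_instance

-- ===== CLAIM (what is proved, stated in full; the proofs are below) =====
def Claim_equal_sosedi : Prop := ∀ (dolsej : List Int) (zemljevid : List (Int × List Int)), Dom_sosedi dolsej zemljevid → Spec_sosedi dolsej zemljevid (sosedi dolsej zemljevid)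

-- ===== LEMMAS AND PROOFS =====

-- a leaf's contribution, as a list chunk of the flattened filtered stream
def chunkF (dolsej : List Int) (p : Int × List Int) : List Int :=
  if dolsej.contains p.1 then p.2.filter (fun n => !(dolsej.contains n)) else []

-- A's inner loop (conditional add) is the add-fold over the filtered neighbor list.
lemma inner_fold_eq (dolsej l s : List Int) :
    l.foldl (fun m x => if !(dolsej.contains x) then PySem.Set.add m x else m) s
      = (l.filter (fun x => !(dolsej.contains x))).foldl PySem.Set.add s := by
  induction l generalizing s with
  | nil => rfl
  | cons x xs ih =>
    simp only [List.foldl_cons, List.filter_cons]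
    cases h : (!(dolsej.contains x)) with
    | false => simp only [Bool.false_eq_true, if_false]; exact ih s
    | true => simp only [if_true, List.foldl_cons]; exact ih _

-- A's outer loop equals the add-fold over the flattened per-key filtered chunks.
lemma outer_fold_eq (dolsej : List Int) (nb : Int → List Int) (ks s : List Int) :
    ks.foldl
      (fun mnozica deli =>
        if dolsej.contains deli then
          (nb deli).foldl
            (fun m x => if !(dolsej.contains x) then PySem.Set.add m x else m) mnozica
        else mnozica) s
      = (ks.flatMap (fun k => chunkF dolsej (k, nb k))).foldl PySem.Set.add s := by
  induction ks generalizing s with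
  | nil => rfl
  | cons k ks ih =>
    simp only [List.foldl_cons, List.flatMap_cons, List.foldl_append, chunkF]
    cases h : dolsej.contains k with
    | false => simp only [Bool.false_eq_true, if_false, List.foldl_nil]; exact ih s
    | true =>
      simp only [if_true]
      rw [inner_fold_eq dolsej (nb k) s]
      exact ih _

-- s.update(set(r)) = s.update(r)
lemma update_ofList_right (s r : List Int) :
    PySem.Set.update s (PySem.Set.ofList r) = PySem.Set.update s r := by
  rw [PySem.Set.update_eq_append_filter, PySem.Set.update_eq_append_filter,
      PySem.Set.ofList_ofList]

-- set(l) | set(r) = set(l ++ r)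
lemma union_ofList (l r : List Int) :
    PySem.Set.union (PySem.Set.ofList l) (PySem.Set.ofList r)
      = PySem.Set.ofList (l ++ r) := by
  rw [PySem.Set.ofList_append]
  exact update_ofList_right _ _

-- B's divide-and-conquer computes set(flattened filtered stream).
lemma go_eq (dolsej : List Int) (chunk : List (Int × List Int)) :
    sosediGo dolsej chunk = PySem.Set.ofList (chunk.flatMap (chunkF dolsej)) := by
  fun_induction sosediGo dolsej chunk with
  | case1 => rfl
  | case2 kn h =>
    have h' : kn.1 ∈ dolsej := by simpa using h
    simp [chunkF, h']
  | case3 kn h =>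
    have h' : kn.1 ∉ dolsej := by simpa using h
    simp [chunkF, h', PySem.Set.empty]
  | case4 a b rest mid ih2 ih1 =>
    rw [ih2, ih1, union_ofList, ← List.flatMap_append, List.take_append_drop]

-- the filtered flattened stream, read off the dict's items
lemma items_flatMap (dolsej : List Int) (zd : PySem.Dict Int (List Int))
    (hnd : zd.keys.Nodup) :
    zd.items.flatMap (chunkF dolsej)
      = zd.keys.flatMap (fun k => chunkF dolsej (k, zd.getD k [])) := by
  rw [PySem.Dict.items_eq_map_keys zd hnd ([] : List Int), List.flatMap_map]

-- ===== VERDICT (by name: the statement is the Claim_ definition above) =====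
theorem sosedi_spec : Claim_equal_sosedi := by
  intro dolsej zemljevid _
  unfold Spec_sosedi sosedi sosedi_alt
  rw [outer_fold_eq, go_eq,
      items_flatMap dolsej _ (PySem.Dict.nodup_keys_ofList zemljevid)]
  rfl
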